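-- pv_equiv track=rewrite | github.com/parallea/PARALLEA-V-1 | manim_renderer.py | summarize_manim_error
-- ===== SOURCE A (Python) =====
-- from typing import Any
--
-- def clean_spaces(text: Any) -> str:
--     return " ".join(str(text or "").split())
--
-- def summarize_manim_error(stderr: Any, stdout: Any, fallback: str = "") -> str:
--     combined = "\n".join([str(stderr or ""), str(stdout or "")])
--     lines = [line.strip() for line in combined.splitlines() if line.strip()]
--     priority_tokens = (
--         "traceback",
--         "exception",
--         "error",
--         "typeerror",
--         "valueerror",
--         "attributeerror",
--         "nameerror",
--         "indexerror",
--         "runtimeerror",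
--         "modulenotfounderror",
--     )
--     for line in reversed(lines):
--         lowered = line.lower()
--         if any(token in lowered for token in priority_tokens):
--             return line[-900:]
--     if lines:
--         return lines[-1][-900:]
--     return clean_spaces(fallback)[-900:]
-- ===== SOURCE B (Python) =====
-- from typing import Any
--
-- def clean_spaces(text: Any) -> str:
--     return " ".join(str(text or "").split())
--
-- def summarize_manim_error(stderr: Any, stdout: Any, fallback: str = "") -> str:
--     # One forward pass, no intermediate list: keep the last stripped nonempty
--     # line and the last one whose lowercase form looks like an error.  Checking
--     # "traceback"/"exception"/"error" suffices: every other token in A's tuple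
--     # contains "error" as a substring.
--     combined = "\n".join([str(stderr or ""), str(stdout or "")])
--     last_line = None
--     last_match = None
--     for raw in combined.splitlines():
--         line = raw.strip()
--         if not line:
--             continue
--         last_line = line
--         low = line.lower()
--         if "traceback" in low or "exception" in low or "error" in low:
--             last_match = line
--     chosen = last_match if last_match is not None else last_line
--     if chosen is None:
--         chosen = clean_spaces(fallback)
--     return chosen[-900:]
-- ===== Notes on version B (the rewrite author's own statement) =====
-- stated objective: alternative
-- what changed: Replaces build-list-then-scan-reversed-with-early-return by a single forward streaming pass that keeps two accumulators (last nonempty line, last error-looking line) and collapses the ten-token scan to three tokens since the other seven all contain "error".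
import Mathlib
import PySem

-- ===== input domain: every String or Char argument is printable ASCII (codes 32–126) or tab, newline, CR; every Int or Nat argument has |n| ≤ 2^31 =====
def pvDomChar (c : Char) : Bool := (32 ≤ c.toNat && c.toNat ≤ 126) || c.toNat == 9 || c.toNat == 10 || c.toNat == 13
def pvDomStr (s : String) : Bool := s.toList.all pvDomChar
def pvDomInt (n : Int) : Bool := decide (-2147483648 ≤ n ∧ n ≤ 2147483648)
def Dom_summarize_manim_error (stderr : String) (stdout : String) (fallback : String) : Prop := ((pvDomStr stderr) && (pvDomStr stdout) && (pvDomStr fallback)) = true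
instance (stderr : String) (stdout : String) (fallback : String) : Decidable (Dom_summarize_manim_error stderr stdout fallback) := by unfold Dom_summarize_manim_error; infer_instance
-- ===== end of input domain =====

-- B replaces A's build-a-list-then-scan-it-reversed-with-early-return by a single
-- forward streaming pass with two accumulators (last nonempty line, last
-- error-looking line), and its token test uses only "traceback"/"exception"/"error",
-- since the other seven tokens of A's tuple all contain "error".

-- ===== PORT A =====
def pvTokensA : List String :=
  ["traceback", "exception", "error", "typeerror", "valueerror", "attributeerror",
   "nameerror", "indexerror", "runtimeerror", "modulenotfounderror"]

-- 'for line in reversed(lines): … return line[-900:]' as recursion on the reversed list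
def pvLoopA : List String → Option String
  | [] => none
  | l :: rest =>
    if pvTokensA.any (fun t => PySem.Str.isIn t (PySem.Str.lower l)) then some l
    else pvLoopA rest

def summarize_manim_error (stderr : String) (stdout : String) (fallback : String) : String :=
  let combined := PySem.Str.join "\n" [stderr, stdout]
  let lines := ((PySem.Str.splitlines combined).map PySem.Str.strip).filter (fun l => l ≠ "")
  match pvLoopA lines.reverse with
  | some l => PySem.Str.slice l (some (-900)) none
  | none =>
    match PySem.List.pyGet? lines (-1) with
    | some l => PySem.Str.slice l (some (-900)) none
    | none => PySem.Str.slice (PySem.Str.join " " (PySem.Str.split₀ fallback)) (some (-900)) none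

-- ===== PORT B =====
-- loop body of Source B's single forward pass: state = (last_match, last_line)
def pvStepB (st : Option String × Option String) (raw : String) : Option String × Option String :=
  let line := PySem.Str.strip raw
  if line = "" then st
  else
    let low := PySem.Str.lower line
    (if PySem.Str.isIn "traceback" low || PySem.Str.isIn "exception" low || PySem.Str.isIn "error" low
       then some line else st.1,
     some line)

def summarize_manim_error_alt (stderr : String) (stdout : String) (fallback : String) : String :=
  let combined := PySem.Str.join "\n" [stderr, stdout]
  let st := (PySem.Str.splitlines combined).foldl pvStepB (none, none)
  let chosen : String :=
    match st.1 with
    | some l => l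
    | none =>
      match st.2 with
      | some l => l
      | none => PySem.Str.join " " (PySem.Str.split₀ fallback)
  PySem.Str.slice chosen (some (-900)) none

-- ===== PRECONDITION & SPEC =====
def Spec_summarize_manim_error (stderr : String) (stdout : String) (fallback : String) (out : String) : Prop := out = summarize_manim_error_alt stderr stdout fallback
instance (stderr : String) (stdout : String) (fallback : String) (out : String) : Decidable (Spec_summarize_manim_error stderr stdout fallback out) := by unfold Spec_summarize_manim_error; infer_instance

-- ===== CLAIM (what is proved, stated in full; the proofs are below) =====
def Claim_equal_summarize_manim_error : Prop := ∀ (stderr : String) (stdout : String) (fallback : String), Dom_summarize_manim_error stderr stdout fallback → Spec_summarize_manim_error stderr stdout fallback (summarize_manim_error stderr stdout fallback)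

-- ===== LEMMAS AND PROOFS =====

-- B's three-token test as a predicate on a (stripped) line
def pvMatchB (l : String) : Bool :=
  PySem.Str.isIn "traceback" (PySem.Str.lower l) || PySem.Str.isIn "exception" (PySem.Str.lower l) ||
    PySem.Str.isIn "error" (PySem.Str.lower l)

-- a token containing "error" can occur only in strings that contain "error"
theorem pv_isIn_err {t : String} (h : ("error" : String).toList <:+: t.toList)
    (low : String) (herr : PySem.Str.isIn "error" low = false) :
    PySem.Str.isIn t low = false := by
  cases hti : PySem.Str.isIn t low with
  | false => rfl
  | true =>
    rw [PySem.Str.isIn_iff_infix] at hti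
    rw [← Bool.not_eq_true, PySem.Str.isIn_iff_infix] at herr
    exact absurd (h.trans hti) herr

-- A's ten-token test equals B's three-token test
theorem pv_tok_eq (l : String) :
    pvTokensA.any (fun t => PySem.Str.isIn t (PySem.Str.lower l)) = pvMatchB l := by
  simp only [pvTokensA, pvMatchB, List.any_cons, List.any_nil, Bool.or_false]
  cases herr : PySem.Str.isIn "error" (PySem.Str.lower l) with
  | true => simp only [Bool.or_true, Bool.true_or]
  | false =>
    rw [
      pv_isIn_err (t := "typeerror") (by decide) _ herr,
      pv_isIn_err (t := "valueerror") (by decide) _ herr,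
      pv_isIn_err (t := "attributeerror") (by decide) _ herr,
      pv_isIn_err (t := "nameerror") (by decide) _ herr,
      pv_isIn_err (t := "indexerror") (by decide) _ herr,
      pv_isIn_err (t := "runtimeerror") (by decide) _ herr,
      pv_isIn_err (t := "modulenotfounderror") (by decide) _ herr]
    simp only [Bool.or_false]

-- A's reverse scan with early return is find? on the reversed list
theorem pv_loopA_eq_find? (L : List String) : pvLoopA L = L.find? pvMatchB := by
  induction L with
  | nil => rfl
  | cons l rest ih =>
    simp only [pvLoopA, List.find?_cons, pv_tok_eq l]
    cases pvMatchB l <;> simp [ih]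

theorem pv_stepB_eq (st : Option String × Option String) (raw : String) :
    pvStepB st raw =
      if PySem.Str.strip raw = "" then st
      else (if pvMatchB (PySem.Str.strip raw) then some (PySem.Str.strip raw) else st.1,
            some (PySem.Str.strip raw)) := rfl

-- characterisation of B's fold: last matching line / last nonempty line (last wins)
theorem pv_foldB (raws : List String) (st : Option String × Option String) :
    raws.foldl pvStepB st =
      (((((raws.map PySem.Str.strip).filter (fun l => l ≠ "")).reverse.find? pvMatchB).or st.1),
       ((((raws.map PySem.Str.strip).filter (fun l => l ≠ "")).reverse.head?).or st.2)) := by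
  induction raws generalizing st with
  | nil => simp
  | cons r rest ih =>
    rw [List.foldl_cons, ih, pv_stepB_eq]
    by_cases h : PySem.Str.strip r = ""
    · simp [h]
    · rw [if_neg h]
      simp only [List.map_cons, List.filter_cons, h, decide_not, decide_false,
        Bool.not_false, if_pos, List.reverse_cons, List.find?_append, List.head?_append,
        Option.or_assoc, List.head?_cons, List.find?_cons]
      cases hm : pvMatchB (PySem.Str.strip r) <;> simp

-- lines[-1] is the head of the reversed list
theorem pv_get_neg_one (L : List String) : PySem.List.pyGet? L (-1) = L.reverse.head? := by
  cases L with
  | nil => rfl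
  | cons a l =>
    simp only [PySem.List.pyGet?, PySem.List.pyIdx?, List.head?_reverse]
    have h2 : -(((a :: l).length : Int)) ≤ -1 := by simp
    norm_num [if_pos h2]
    simp [List.getLast?_eq_getElem?]

theorem summarize_manim_error_eq (stderr stdout fallback : String) :
    summarize_manim_error stderr stdout fallback = summarize_manim_error_alt stderr stdout fallback := by
  unfold summarize_manim_error summarize_manim_error_alt
  simp only [pv_loopA_eq_find?, pv_get_neg_one, pv_foldB, Option.or_none]
  cases (((PySem.Str.splitlines (PySem.Str.join "\n" [stderr, stdout])).map PySem.Str.strip).filter (fun l => l ≠ "")).reverse.find? pvMatchB with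
  | some l => rfl
  | none =>
    cases (((PySem.Str.splitlines (PySem.Str.join "\n" [stderr, stdout])).map PySem.Str.strip).filter (fun l => l ≠ "")).reverse.head? with
    | some l => rfl
    | none => rfl

-- ===== VERDICT (by name: the statement is the Claim_ definition above) =====
theorem summarize_manim_error_spec : Claim_equal_summarize_manim_error := by
  intro stderr stdout fallback _
  exact summarize_manim_error_eq stderr stdout fallback
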